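-- pv_equiv track=rewrite | github.com/waliens/tbc-rdruid-simulator | excel.py | to_formula
-- ===== SOURCE A (Python) =====
-- from collections import defaultdict
--
-- def to_formula(heals, over_time=None):
--     heal_dict = defaultdict(lambda: 0)
--     for heal_tokken in heals:
--         heal_dict[heal_tokken] += 1
--     f = "+".join(["({mult} * ({form}))".format(mult=mult, form=form) for form, mult in heal_dict.items()])
--     if over_time is None:
--         return "(" + f + ")"
--     return "({})/{}".format(f, over_time)
-- ===== SOURCE B (Python) =====
-- def to_formula(heals, over_time=None):
--     # Partition scheme: repeatedly take the first remaining token, measure its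
--     # multiplicity by how much the list shrinks when all its copies are filtered
--     # out, and recurse on the remainder (no counting dictionary at all).
--     seq = list(heals)
--     terms = []
--     while seq:
--         form = seq[0]
--         n = len(seq)
--         seq = [t for t in seq if t != form]
--         terms.append("({} * ({}))".format(n - len(seq), form))
--     f = "+".join(terms)
--     if over_time is None:
--         return "(" + f + ")"
--     return "({})/{}".format(f, over_time)
-- ===== Notes on version B (the rewrite author's own statement) =====
-- stated objective: alternative
-- what changed: Replaces A's single accumulating defaultdict loop over a counting dictionary with a dictionary-free partition recursion: repeatedly take the first remaining token, obtain its multiplicity from the length drop after filtering out all its copies, and continue on the filtered remainder.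
import Mathlib
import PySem

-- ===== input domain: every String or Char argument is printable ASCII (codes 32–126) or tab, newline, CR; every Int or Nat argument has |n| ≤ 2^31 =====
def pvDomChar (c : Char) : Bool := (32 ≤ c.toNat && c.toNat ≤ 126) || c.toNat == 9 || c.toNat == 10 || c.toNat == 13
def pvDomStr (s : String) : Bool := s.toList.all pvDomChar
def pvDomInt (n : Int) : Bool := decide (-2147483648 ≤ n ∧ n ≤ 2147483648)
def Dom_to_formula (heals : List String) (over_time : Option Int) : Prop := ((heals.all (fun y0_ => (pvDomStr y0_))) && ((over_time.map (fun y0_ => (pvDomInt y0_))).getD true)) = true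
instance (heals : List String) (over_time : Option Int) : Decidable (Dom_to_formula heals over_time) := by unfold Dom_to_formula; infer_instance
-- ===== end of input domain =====

-- B replaces A's counting-dictionary loop with a dictionary-free partition recursion
-- (multiplicity = length drop after filtering out the first token's copies); alternative
-- decomposition, same return value, not claimed faster.

-- ===== PORT A =====
def to_formula (heals : List String) (over_time : Option Int) : String :=
  let heal_dict : PySem.Dict String Int :=
    heals.foldl (fun d t => d.modify t 0 (· + 1)) PySem.Dict.empty
  let f := PySem.Str.join "+"
    (heal_dict.items.map (fun p => "(" ++ PySem.Int.toStr p.2 ++ " * (" ++ p.1 ++ "))"))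
  match over_time with
  | none => "(" ++ f ++ ")"
  | some t => "(" ++ f ++ ")/" ++ PySem.Int.toStr t

-- ===== PORT B =====
-- the while loop of Source B: take the first token, filter out all its copies,
-- emit a term whose multiplicity is the length drop, continue on the remainder
def altTerms : List String → List String
  | [] => []
  | form :: rest =>
      let seq := form :: rest
      let seq' := seq.filter (fun t => !(t == form))
      ("(" ++ PySem.Int.toStr ((seq.length : Int) - (seq'.length : Int)) ++ " * (" ++ form ++ "))")
        :: altTerms seq'
  termination_by l => l.length
  decreasing_by
    simp only [List.filter_cons, beq_self_eq_true, Bool.not_true, List.length_cons]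
    exact Nat.lt_succ_of_le (List.length_filter_le _ _)

def to_formula_alt (heals : List String) (over_time : Option Int) : String :=
  let f := PySem.Str.join "+" (altTerms heals)
  match over_time with
  | none => "(" ++ f ++ ")"
  | some t => "(" ++ f ++ ")/" ++ PySem.Int.toStr t

-- ===== PRECONDITION & SPEC =====
def Spec_to_formula (heals : List String) (over_time : Option Int) (out : String) : Prop := out = to_formula_alt heals over_time
instance (heals : List String) (over_time : Option Int) (out : String) : Decidable (Spec_to_formula heals over_time out) := by unfold Spec_to_formula; infer_instance

-- ===== CLAIM (what is proved, stated in full; the proofs are below) =====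
def Claim_equal_to_formula : Prop := ∀ (heals : List String) (over_time : Option Int), Dom_to_formula heals over_time → Spec_to_formula heals over_time (to_formula heals over_time)

-- ===== LEMMAS AND PROOFS =====

-- filtering commutes with ordered deduplication
theorem ofList_filter (p : String → Bool) (xs : List String) :
    PySem.Set.ofList (xs.filter p) = (PySem.Set.ofList xs).filter p := by
  induction xs with
  | nil => simp [PySem.Set.ofList, PySem.Set.empty]
  | cons x xs ih =>
    by_cases h : p x = true
    · rw [List.filter_cons_of_pos h, PySem.Set.ofList_cons, PySem.Set.ofList_cons,
        List.filter_cons_of_pos h, ih]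
      simp only [PySem.Set.discard, List.filter_filter]
      congr 1
      apply List.filter_congr
      intro a _
      rw [Bool.and_comm]
    · rw [List.filter_cons_of_neg h, PySem.Set.ofList_cons, List.filter_cons_of_neg h, ih]
      simp only [PySem.Set.discard, List.filter_filter]
      apply List.filter_congr
      intro a _
      by_cases ha : (a == x) = true
      · have : a = x := by simpa using ha
        subst this
        simp [h]
      · simp [ha]

-- a p / ¬p filter splits the length
theorem length_filter_split (p : String → Bool) (l : List String) :
    (l.filter p).length + (l.filter (fun a => !p a)).length = l.length := by
  rw [← List.countP_eq_length_filter, ← List.countP_eq_length_filter,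
      List.length_eq_countP_add_countP p]
  congr 1
  apply List.countP_congr
  intro a _
  by_cases h : p a <;> simp [h]

-- the partition recursion produces exactly A's (first-occurrence token, count) terms
theorem altTerms_eq (l : List String) :
    altTerms l = (PySem.Set.ofList l).map
      (fun g => "(" ++ PySem.Int.toStr ((List.count g l : Nat) : Int) ++ " * (" ++ g ++ "))") := by
  match l with
  | [] => simp [altTerms, PySem.Set.ofList, PySem.Set.empty]
  | form :: rest =>
    rw [altTerms]
    have hlen : ((form :: rest).length : Int)
        - (((form :: rest).filter (fun t => !(t == form))).length : Int)
        = ((List.count form (form :: rest) : Nat) : Int) := by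
      have h1 := length_filter_split (fun t => t == form) (form :: rest)
      have h2 : List.count form (form :: rest)
          = ((form :: rest).filter (fun t => t == form)).length := by
        rw [List.count, List.countP_eq_length_filter]
      omega
    have ih := altTerms_eq ((form :: rest).filter (fun t => !(t == form)))
    rw [PySem.Set.ofList_cons, List.map_cons]
    refine congrArg₂ _ (by rw [hlen]) ?_
    rw [ih]
    have hset : PySem.Set.ofList ((form :: rest).filter (fun t => !(t == form)))
        = (PySem.Set.ofList rest).discard form := by
      rw [List.filter_cons_of_neg (by simp), ofList_filter]
      rfl
    rw [hset]
    apply List.map_congr_left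
    intro g hg
    have hne : (g == form) = false := by
      have := (PySem.Set.mem_discard (s := PySem.Set.ofList rest) (x := form) (y := g)).mp hg
      simpa using this.2
    have hc : List.count g ((form :: rest).filter (fun t => !(t == form)))
        = List.count g (form :: rest) := by
      apply List.count_filter
      simp [hne]
    rw [hc]
  termination_by l.length
  decreasing_by
    simp only [List.filter_cons, beq_self_eq_true, Bool.not_true, List.length_cons]
    exact Nat.lt_succ_of_le (List.length_filter_le _ _)

-- ===== VERDICT (by name: the statement is the Claim_ definition above) =====
theorem to_formula_spec : Claim_equal_to_formula := by
  intro heals over_time _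
  unfold Spec_to_formula to_formula to_formula_alt
  rw [← PySem.Dict.counter_eq_foldl, altTerms_eq]
  simp only [PySem.Dict.items_counter, List.map_map, Function.comp_def]
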